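-- pv_equiv track=rewrite | github.com/GlacyalWolf/programingAlgoritms2 | List2/deleteDigits.py | delete_digits
-- ===== SOURCE A (Python) =====
-- def delete_digits(string):
--     '''
--     >>> delete_digits('#Pelham 1-2-3#')
--     '#Pelham --#'
--     >>> delete_digits('7 up')
--     ' up'
--     >>> delete_digits('92920')
--     '''
--     arr=[];
--     cont=0;
--     descarte=[]
--
--     for i in string:
--         arr.append(i);
--
--         cont=cont+1;
--
--     for i in range(len(arr)):
--
--         if(arr[i]=="0" or arr[i]=="1" or arr[i]=="2" or arr[i]=="3" or arr[i]=="4" or arr[i]=="5" or arr[i]=="6" or arr[i]=="7" or arr[i]=="8" or arr[i]=="9"):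
--             descarte.append(i);
--
--
--
--     for i in descarte:
--         arr[i]="";
--
--     nuevo="".join(arr);
--
--     return nuevo
-- ===== SOURCE B (Python) =====
-- def delete_digits(string):
--     return string.translate(str.maketrans('', '', '0123456789'))
-- ===== Notes on version B (the rewrite author's own statement) =====
-- stated objective: idiomatic
-- what changed: B deletes digits in a single table-driven translate pass instead of A's three passes (explode to a char list, collect digit indices, blank those slots and re-join).
import Mathlib
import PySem

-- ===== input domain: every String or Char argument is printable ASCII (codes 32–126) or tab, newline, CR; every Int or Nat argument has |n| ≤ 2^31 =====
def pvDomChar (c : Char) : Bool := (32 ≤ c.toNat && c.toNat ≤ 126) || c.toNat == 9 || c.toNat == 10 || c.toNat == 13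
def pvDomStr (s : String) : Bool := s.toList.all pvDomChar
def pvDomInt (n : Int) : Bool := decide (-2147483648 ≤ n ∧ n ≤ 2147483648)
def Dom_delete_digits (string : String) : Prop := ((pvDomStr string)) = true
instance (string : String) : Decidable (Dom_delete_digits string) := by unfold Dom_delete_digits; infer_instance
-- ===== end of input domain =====

-- B deletes digits in one table-driven translate pass instead of A's three passes
-- (explode to a char list, collect digit indices, blank those slots, re-join); objective: idiomatic.

-- ===== PORT A =====
-- digit test exactly as A's chained '==' comparisons on one-char strings
def pvIsDigStr (s : String) : Bool :=
  s == "0" || s == "1" || s == "2" || s == "3" || s == "4" ||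
  s == "5" || s == "6" || s == "7" || s == "8" || s == "9"

def delete_digits (string : String) : String :=
  -- first loop: arr.append(i); cont=cont+1 (cont is dead state, carried faithfully)
  let st := string.toList.foldl
    (fun (p : List String × Nat) c => (p.1 ++ [String.ofList [c]], p.2 + 1)) ([], 0)
  let arr := st.1
  -- second loop: for i in range(len(arr)): if digit: descarte.append(i)
  let descarte := (List.range arr.length).foldl
    (fun d i => if pvIsDigStr (arr.getD i "") then d ++ [i] else d) []
  -- third loop: for i in descarte: arr[i] = ""
  let arr2 := descarte.foldl (fun (a : List String) i => a.set i "") arr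
  PySem.Str.join "" arr2

-- ===== PORT B =====
-- Source B: string.translate(str.maketrans('', '', '0123456789')) — a deletion-only
-- translation table removes exactly the characters of '0123456789'; ported by hand
-- as that single filtering pass (exact on all inputs).
def delete_digits_alt (string : String) : String :=
  String.ofList (string.toList.filter (fun c => !("0123456789".toList.contains c)))

-- ===== PRECONDITION & SPEC =====
def Spec_delete_digits (string : String) (out : String) : Prop := out = delete_digits_alt string
instance (string : String) (out : String) : Decidable (Spec_delete_digits string out) := by unfold Spec_delete_digits; infer_instance

-- ===== CLAIM (what is proved, stated in full; the proofs are below) =====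
def Claim_equal_delete_digits : Prop := ∀ (string : String), Dom_delete_digits string → Spec_delete_digits string (delete_digits string)

-- ===== LEMMAS AND PROOFS =====

theorem pvIsDigStr_singleton (c : Char) :
    pvIsDigStr (String.ofList [c]) = "0123456789".toList.contains c := by
  have hb : ∀ d : Char, (String.ofList [c] == String.ofList [d]) = (c == d) := by
    intro d; simp [String.ext_iff]
  simp [pvIsDigStr, show ("0":String) = String.ofList ['0'] from rfl,
    show ("1":String) = String.ofList ['1'] from rfl,
    show ("2":String) = String.ofList ['2'] from rfl,
    show ("3":String) = String.ofList ['3'] from rfl,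
    show ("4":String) = String.ofList ['4'] from rfl,
    show ("5":String) = String.ofList ['5'] from rfl,
    show ("6":String) = String.ofList ['6'] from rfl,
    show ("7":String) = String.ofList ['7'] from rfl,
    show ("8":String) = String.ofList ['8'] from rfl,
    show ("9":String) = String.ofList ['9'] from rfl, hb]
  rw [Bool.eq_iff_iff]; simp; tauto

-- setting slots to "" at the indices js: pointwise description of the result
theorem foldl_set_getElem? (js : List Nat) (a : List String) (i : Nat) :
    (js.foldl (fun (a : List String) j => a.set j "") a)[i]? =
      if i ∈ js ∧ i < a.length then some "" else a[i]? := by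
  induction js generalizing a with
  | nil => simp
  | cons j js ih =>
    simp only [List.foldl_cons, ih, List.length_set, List.getElem?_set]
    by_cases hji : j = i
    · subst hji
      by_cases hlen : j < a.length
      · by_cases hm : j ∈ js <;> simp [hm, hlen]
      · by_cases hm : j ∈ js <;> simp [hm, hlen]
    · by_cases hm : i ∈ js
      · simp [hji, hm]
      · simp [hji, hm]
        intro h
        exact absurd h (Ne.symm hji)

-- join with empty separator peels off the head
theorem join_nil_cons (x : List Char) (xs : List (List Char)) :
    PySem.Chars.join [] (x :: xs) = x ++ PySem.Chars.join [] xs := by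
  cases xs with
  | nil => simp [PySem.Chars.join_singleton, PySem.Chars.join_nil]
  | cons y ys => rw [PySem.Chars.join_cons_cons]; simp

theorem join_blanked (l : List Char) :
    PySem.Chars.join []
        (l.map (fun c => if "0123456789".toList.contains c then [] else [c])) =
      l.filter (fun c => !("0123456789".toList.contains c)) := by
  induction l with
  | nil => simp [PySem.Chars.join_nil]
  | cons c t ih =>
    rw [List.map_cons, join_nil_cons, ih]
    by_cases h : "0123456789".toList.contains c = true
    · rw [if_pos h, List.filter_cons_of_neg (by simp only [h, Bool.not_true]; simp), List.nil_append]
    · have h' : "0123456789".toList.contains c = false := eq_false_of_ne_true h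
      rw [if_neg h, List.filter_cons_of_pos (by simp only [h', Bool.not_false]), List.singleton_append]

-- ===== VERDICT =====
theorem delete_digits_spec : Claim_equal_delete_digits := by
  intro s _
  unfold Spec_delete_digits delete_digits delete_digits_alt
  rw [PySem.List.foldl_prod_mk (f := fun (a : List String) c => a ++ [String.ofList [c]])
      (g := fun (n : Nat) _ => n + 1)]
  simp only [PySem.List.foldl_append_singleton_eq_map, List.nil_append]
  set l := s.toList with hl
  set arr : List String := l.map (fun c => String.ofList [c]) with harr
  set descarte := (List.range arr.length).foldl
    (fun d i => if pvIsDigStr (arr.getD i "") then d ++ [i] else d) [] with hdes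
  have hdes' : descarte = (List.range arr.length).filter
      (fun i => pvIsDigStr (arr.getD i "")) := by
    rw [hdes, PySem.List.foldl_append_if_eq_filter]; simp
  -- the blanked array is a pointwise map over l
  have harr2 : descarte.foldl (fun (a : List String) i => a.set i "") arr =
      l.map (fun c => if "0123456789".toList.contains c then "" else String.ofList [c]) := by
    apply List.ext_getElem?
    intro i
    rw [foldl_set_getElem?]
    by_cases hi : i < l.length
    · have hil : i < arr.length := by simp [harr, hi]
      have hget : arr.getD i "" = String.ofList [l[i]'hi] := by
        simp [harr, List.getD_eq_getElem?_getD, hi]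
      by_cases hd : "0123456789".toList.contains (l[i]'hi) = true
      · have hmem : i ∈ descarte := by
          rw [hdes']
          refine List.mem_filter.mpr ⟨List.mem_range.mpr hil, ?_⟩
          show pvIsDigStr (arr.getD i "") = true
          rw [hget, pvIsDigStr_singleton]; exact hd
        rw [if_pos ⟨hmem, hil⟩, List.getElem?_map, List.getElem?_eq_getElem hi,
            Option.map_some, if_pos hd]
      · have hmem : i ∉ descarte := by
          rw [hdes']; intro hmem
          have h2 := (List.mem_filter.mp hmem).2
          simp only at h2
          rw [hget, pvIsDigStr_singleton] at h2
          exact hd h2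
        rw [if_neg (by tauto), harr, List.getElem?_map, List.getElem?_map,
            List.getElem?_eq_getElem hi, Option.map_some, Option.map_some, if_neg hd]
    · have hnl : l.length ≤ i := not_lt.mp hi
      rw [if_neg (by intro h; exact absurd h.2 (by simp [harr]; omega))]
      rw [List.getElem?_eq_none (by simp [harr]; omega),
          List.getElem?_eq_none (by simp; omega)]
  rw [harr2]
  -- compare the two strings through their character lists
  apply String.ext ?_
  rw [PySem.Str.toList_join]
  simp only [List.map_map]
  have hmap : (fun c => ((if "0123456789".toList.contains c then "" else String.ofList [c]) : String).toList)
      = fun c => if "0123456789".toList.contains c then ([] : List Char) else [c] := by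
    funext c
    by_cases h : "0123456789".toList.contains c = true
    · rw [if_pos h, if_pos h]; rfl
    · rw [if_neg h, if_neg h]; simp
  simp only [Function.comp_def]
  rw [show (fun c => (String.toList (if "0123456789".toList.contains c then "" else String.ofList [c]))) = fun c => if "0123456789".toList.contains c then ([] : List Char) else [c] from hmap]
  rw [show ("" : String).toList = ([] : List Char) from rfl]
  rw [join_blanked]
  simp
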